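-- pv_equiv track=rewrite | github.com/MANHO219/Generative-recommendation-system-with-semantic-ID | semantic_id/dataset.py | build_geo_partition
-- ===== SOURCE A (Python) =====
-- from typing import Dict, List, Optional, Tuple, Any
-- from collections import defaultdict
--
-- def build_geo_partition(
--     business_list: Dict,
--     min_city_poi: int = 200
-- ) -> Tuple[Dict, Dict, Dict]:
--     """
--     按 state/city 统计 POI 数，小城市合并至 {state}_other 桶
--
--     Args:
--         business_list: {business_id: business_dict} 来自 business_poi.json
--         min_city_poi:  POI 数小于此值的城市归入 {state}:_other 桶
--
--     Returns:
--         geo_map:    {business_id: {'state': str, 'city': str, 'bucket': str}}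
--         state_vocab:{state: idx}   0=PAD, 1=UNK, 2+ 为各州
--         city_vocab: {bucket: idx}  0=PAD, 1=UNK, 2+ 为各桶
--     """
--     # 统计每个 state:city 组合的 POI 数
--     city_counts: Dict[str, int] = defaultdict(int)
--     for biz in business_list.values():
--         state = biz.get('state', '') or ''
--         city  = biz.get('city', '')  or ''
--         key   = f"{state}:{city}"
--         city_counts[key] += 1
--
--     # 构建 geo_map：小城市合并至 {state}:_other
--     geo_map: Dict[str, Dict] = {}
--     for bid, biz in business_list.items():
--         state  = biz.get('state', '') or ''
--         city   = biz.get('city', '')  or ''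
--         key    = f"{state}:{city}"
--         if city_counts[key] >= min_city_poi:
--             bucket = key
--         else:
--             bucket = f"{state}:_other"
--         geo_map[bid] = {'state': state, 'city': city, 'bucket': bucket}
--
--     # 建 state_vocab
--     all_states  = sorted({v['state']  for v in geo_map.values()})
--     state_vocab: Dict[str, int] = {'<PAD>': 0, '<UNK>': 1}
--     for s in all_states:
--         if s not in state_vocab:
--             state_vocab[s] = len(state_vocab)
--
--     # 建 city_vocab（以 bucket 为单位）
--     all_buckets = sorted({v['bucket'] for v in geo_map.values()})
--     city_vocab: Dict[str, int] = {'<PAD>': 0, '<UNK>': 1}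
--     for b in all_buckets:
--         if b not in city_vocab:
--             city_vocab[b] = len(city_vocab)
--
--     return geo_map, state_vocab, city_vocab
-- ===== SOURCE B (Python) =====
-- def build_geo_partition(business_list, min_city_poi=200):
--     # Sort-then-scan replaces A's hash counting: the composite keys are sorted
--     # and a run-length scan collects the set of keys whose run is long enough;
--     # the bucket test then becomes a set-membership test.  The vocabularies are
--     # built as dict-literal merges over enumerate(extras, 2) instead of A's
--     # grow-by-len insertion loop.
--     recs = [(bid, biz.get('state') or '', biz.get('city') or '')
--             for bid, biz in business_list.items()]
--     keys = [f"{s}:{c}" for _, s, c in recs]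
--
--     big = set()
--     prev, run = None, 0
--     for k in sorted(keys):
--         if k == prev:
--             run += 1
--         else:
--             if prev is not None and run >= min_city_poi:
--                 big.add(prev)
--             prev, run = k, 1
--     if prev is not None and run >= min_city_poi:
--         big.add(prev)
--
--     geo_map = {}
--     for (bid, s, c), key in zip(recs, keys):
--         bucket = key if key in big else f"{s}:_other"
--         geo_map[bid] = {'state': s, 'city': c, 'bucket': bucket}
--
--     def vocab(values):
--         extras = [v for v in sorted(set(values)) if v not in ('<PAD>', '<UNK>')]
--         return {'<PAD>': 0, '<UNK>': 1, **{v: i for i, v in enumerate(extras, 2)}}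
--
--     state_vocab = vocab(v['state'] for v in geo_map.values())
--     city_vocab = vocab(v['bucket'] for v in geo_map.values())
--     return geo_map, state_vocab, city_vocab
-- ===== Notes on version B (the rewrite author's own statement) =====
-- stated objective: alternative
-- what changed: B replaces A's hash-count pass (defaultdict increment + threshold lookup per record) by sort-then-scan: it sorts the composite keys once, a run-length scan over the sorted list collects the set of sufficiently frequent keys, and the bucket decision becomes a set-membership test; the vocabularies are built as dict-literal merges over enumerate(extras, 2) instead of A's grow-by-len insertion loop.
import Mathlib
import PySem

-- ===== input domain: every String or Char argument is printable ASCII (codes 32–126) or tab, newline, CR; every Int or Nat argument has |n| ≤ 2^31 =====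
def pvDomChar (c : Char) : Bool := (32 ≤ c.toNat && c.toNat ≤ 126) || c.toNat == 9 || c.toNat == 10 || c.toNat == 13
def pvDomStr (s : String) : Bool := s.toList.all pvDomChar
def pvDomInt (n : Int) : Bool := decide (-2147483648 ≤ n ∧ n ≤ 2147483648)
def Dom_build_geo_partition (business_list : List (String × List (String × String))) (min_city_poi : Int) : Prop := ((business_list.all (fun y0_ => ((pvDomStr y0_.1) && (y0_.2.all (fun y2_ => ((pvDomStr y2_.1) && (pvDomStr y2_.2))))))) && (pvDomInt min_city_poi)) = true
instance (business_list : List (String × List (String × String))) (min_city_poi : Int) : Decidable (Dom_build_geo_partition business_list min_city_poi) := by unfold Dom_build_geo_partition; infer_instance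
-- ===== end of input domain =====

-- B replaces A's hash-count pass by sort-then-run-scan over the composite keys (bucket test
-- becomes set membership) and builds the vocabularies by enumerate over the filtered sorted
-- extras instead of A's grow-by-len loop; objective: alternative algorithm, same results.


-- ===== PORT A =====
-- biz.get(k, '') or '' : the dict lookup with default '', then `or ''` (identity except mapping '' to '')
def pvAGet (biz : List (String × String)) (k : String) : String :=
  let v := PySem.Dict.getD (PySem.Dict.mk biz) k ""
  if v == "" then "" else v

def build_geo_partition (business_list : List (String × List (String × String))) (min_city_poi : Int) : (List (String × List (String × String))) × (List (String × Int)) × (List (String × Int)) :=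
  -- city_counts: defaultdict(int) loop over business_list.values()
  let city_counts : PySem.Dict String Int :=
    business_list.foldl (fun d p =>
      let state := pvAGet p.2 "state"
      let city := pvAGet p.2 "city"
      let key := state ++ ":" ++ city
      d.modify key 0 (· + 1)) PySem.Dict.empty
  -- geo_map loop over business_list.items(); city_counts[key] is exact as getD (the key was
  -- counted in the first loop over the same list, so defaultdict's implicit insert is unobservable)
  let geo_map : PySem.Dict String (List (String × String)) :=
    business_list.foldl (fun g p =>
      let state := pvAGet p.2 "state"
      let city := pvAGet p.2 "city"
      let key := state ++ ":" ++ city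
      let bucket := if city_counts.getD key 0 ≥ min_city_poi then key else state ++ ":_other"
      g.insert p.1 [("state", state), ("city", city), ("bucket", bucket)]) PySem.Dict.empty
  -- v['state'] / v['bucket']: the key is always present in the 3-entry dicts built above, so getD is exact
  let all_states :=
    PySem.List.sorted (PySem.Set.ofList (geo_map.values.map (fun v => PySem.Dict.getD (PySem.Dict.mk v) "state" ""))) (fun x => x) false
  let state_vocab : PySem.Dict String Int :=
    all_states.foldl (fun d s => if d.contains s then d else d.insert s (d.size : Int))
      (PySem.Dict.mk [("<PAD>", 0), ("<UNK>", 1)])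
  let all_buckets :=
    PySem.List.sorted (PySem.Set.ofList (geo_map.values.map (fun v => PySem.Dict.getD (PySem.Dict.mk v) "bucket" ""))) (fun x => x) false
  let city_vocab : PySem.Dict String Int :=
    all_buckets.foldl (fun d b => if d.contains b then d else d.insert b (d.size : Int))
      (PySem.Dict.mk [("<PAD>", 0), ("<UNK>", 1)])
  (geo_map.items, state_vocab.items, city_vocab.items)

-- ===== PORT B =====
-- biz.get(k) or '' : optional lookup; None and '' both give ''
def pvBGet (biz : List (String × String)) (k : String) : String :=
  match PySem.Dict.get? (PySem.Dict.mk biz) k with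
  | some v => if v == "" then "" else v
  | none => ""

-- the loop body of B's run-length scan over the sorted keys; state = (big, prev, run)
def pvScanStep (min_city_poi : Int) (st : PySem.Set String × Option String × Int) (k : String) :
    PySem.Set String × Option String × Int :=
  if (match st.2.1 with | some p => k == p | none => false) then (st.1, st.2.1, st.2.2 + 1)
  else
    let big' := match st.2.1 with
      | some p => if st.2.2 ≥ min_city_poi then st.1.add p else st.1
      | none => st.1
    (big', some k, 1)

-- the `if prev is not None and run >= min_city_poi: big.add(prev)` after the loop
def pvFlush (min_city_poi : Int) (st : PySem.Set String × Option String × Int) : PySem.Set String :=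
  match st.2.1 with
  | some p => if st.2.2 ≥ min_city_poi then st.1.add p else st.1
  | none => st.1

-- {'<PAD>': 0, '<UNK>': 1, **{v: i for i, v in enumerate(extras, 2)}}
def pvVocab (values : List String) : PySem.Dict String Int :=
  let extras := (PySem.List.sorted (PySem.Set.ofList values) (fun x => x) false).filter
    (fun v => !(v == "<PAD>" || v == "<UNK>"))
  (PySem.List.enumerate extras 2).foldl (fun d p => d.insert p.2 p.1)
    (PySem.Dict.mk [("<PAD>", 0), ("<UNK>", 1)])

def build_geo_partition_alt (business_list : List (String × List (String × String))) (min_city_poi : Int) : (List (String × List (String × String))) × (List (String × Int)) × (List (String × Int)) :=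
  let recs : List (String × String × String) :=
    business_list.map (fun p => (p.1, pvBGet p.2 "state", pvBGet p.2 "city"))
  let keys : List String := recs.map (fun r => r.2.1 ++ ":" ++ r.2.2)
  -- sort-then-scan: collect the keys whose run length reaches min_city_poi
  let big : PySem.Set String :=
    pvFlush min_city_poi
      ((PySem.List.sorted keys (fun x => x) false).foldl (pvScanStep min_city_poi)
        (PySem.Set.ofList [], none, 0))
  let geo_map : PySem.Dict String (List (String × String)) :=
    (recs.zip keys).foldl (fun g rk =>
      let bucket := if big.contains rk.2 then rk.2 else rk.1.2.1 ++ ":_other"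
      g.insert rk.1.1 [("state", rk.1.2.1), ("city", rk.1.2.2), ("bucket", bucket)]) PySem.Dict.empty
  -- v['state'] / v['bucket'] always present in the dicts built above, so getD is exact
  let state_vocab := pvVocab (geo_map.values.map (fun v => PySem.Dict.getD (PySem.Dict.mk v) "state" ""))
  let city_vocab := pvVocab (geo_map.values.map (fun v => PySem.Dict.getD (PySem.Dict.mk v) "bucket" ""))
  (geo_map.items, state_vocab.items, city_vocab.items)

-- ===== PRECONDITION & SPEC =====
def Spec_build_geo_partition (business_list : List (String × List (String × String))) (min_city_poi : Int) (out : (List (String × List (String × String))) × (List (String × Int)) × (List (String × Int))) : Prop := out = build_geo_partition_alt business_list min_city_poi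
instance (business_list : List (String × List (String × String))) (min_city_poi : Int) (out : (List (String × List (String × String))) × (List (String × Int)) × (List (String × Int))) : Decidable (Spec_build_geo_partition business_list min_city_poi out) := by unfold Spec_build_geo_partition; infer_instance

-- ===== CLAIM (what is proved, stated in full; the proofs are below) =====
def Claim_equal_build_geo_partition : Prop := ∀ (business_list : List (String × List (String × String))) (min_city_poi : Int), Dom_build_geo_partition business_list min_city_poi → Spec_build_geo_partition business_list min_city_poi (build_geo_partition business_list min_city_poi)

-- ===== LEMMAS AND PROOFS =====

-- the two `get(..) or ''` helpers agree
theorem pvGet_eq (biz : List (String × String)) (k : String) : pvAGet biz k = pvBGet biz k := by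
  unfold pvAGet pvBGet
  rw [PySem.Dict.getD_eq_get?_getD]
  cases PySem.Dict.get? (PySem.Dict.mk biz) k <;> simp

-- A's count loop is Counter over the mapped keys
theorem counts_eq (bl : List (String × List (String × String))) :
    (bl.foldl (fun d p =>
      let state := pvBGet p.2 "state"
      let city := pvBGet p.2 "city"
      let key := state ++ ":" ++ city
      d.modify key 0 (· + 1)) PySem.Dict.empty)
    = PySem.Dict.counter (bl.map (fun p => pvBGet p.2 "state" ++ ":" ++ pvBGet p.2 "city")) := by
  rw [PySem.Dict.counter_eq_foldl, List.foldl_map]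

-- invariant of the run-length scan: with prev = some p, run = r and every pending element ≥ p,
-- the flushed result contains exactly big, p if its total count reaches min, and the frequent tail keys
theorem scan_invariant (m : Int) (l : List String) :
    ∀ (big : PySem.Set String) (p : String) (r : Int),
      l.Pairwise (· ≤ ·) → (∀ y ∈ l, p ≤ y) → ∀ x,
      (x ∈ pvFlush m (l.foldl (pvScanStep m) (big, some p, r)) ↔
        x ∈ big ∨ (x = p ∧ r + (l.count p : Int) ≥ m) ∨ (x ∈ l ∧ x ≠ p ∧ (l.count x : Int) ≥ m)) := by
  induction l with
  | nil =>
    intro big p r _ _ x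
    simp only [List.foldl_nil, pvFlush, List.count_nil, List.not_mem_nil]
    split_ifs with h
    · rw [PySem.Set.mem_add]; constructor
      · rintro (hb | rfl)
        · exact Or.inl hb
        · exact Or.inr (Or.inl ⟨rfl, by simpa using h⟩)
      · rintro (hb | ⟨rfl, _⟩ | ⟨h, _⟩)
        · exact Or.inl hb
        · exact Or.inr rfl
        · exact absurd h (by simp)
    · constructor
      · exact Or.inl
      · rintro (hb | ⟨rfl, hr⟩ | ⟨h, _⟩)
        · exact hb
        · exact absurd (by simpa using hr) h
        · exact absurd h (by simp)
  | cons k t ih =>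
    intro big p r hpw hge x
    rw [List.foldl_cons]
    by_cases hkp : k = p
    · subst hkp
      have hstep : pvScanStep m (big, some k, r) k = (big, some k, r + 1) := by
        simp [pvScanStep]
      rw [hstep, ih big k (r + 1) hpw.of_cons (fun y hy => (List.pairwise_cons.mp hpw).1 y hy) x]
      simp only [List.count_cons_self, List.mem_cons]
      constructor
      · rintro (hb | ⟨rfl, hr⟩ | ⟨ht, hne, hc⟩)
        · exact Or.inl hb
        · exact Or.inr (Or.inl ⟨rfl, by push_cast at hr ⊢; omega⟩)
        · exact Or.inr (Or.inr ⟨Or.inr ht, hne, by rwa [List.count_cons_of_ne (Ne.symm hne)]⟩)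
      · rintro (hb | ⟨rfl, hr⟩ | ⟨hm, hne, hc⟩)
        · exact Or.inl hb
        · exact Or.inr (Or.inl ⟨rfl, by push_cast at hr ⊢; omega⟩)
        · rcases hm with rfl | ht
          · exact absurd rfl hne
          · exact Or.inr (Or.inr ⟨ht, hne, by rwa [List.count_cons_of_ne (Ne.symm hne)] at hc⟩)
    · have hpk : p < k := lt_of_le_of_ne (hge k (List.mem_cons_self)) (Ne.symm hkp)
      have hpt : p ∉ t := fun h => absurd ((List.pairwise_cons.mp hpw).1 p h) (not_le.mpr hpk)
      have hstep : pvScanStep m (big, some p, r) k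
          = ((if r ≥ m then big.add p else big), some k, 1) := by
        simp [pvScanStep, show (k == p) = false by simp [hkp]]
      rw [hstep, ih _ k 1 hpw.of_cons (fun y hy => (List.pairwise_cons.mp hpw).1 y hy) x]
      have hbig' : x ∈ (if r ≥ m then big.add p else big) ↔ x ∈ big ∨ (x = p ∧ r ≥ m) := by
        split_ifs with h
        · rw [PySem.Set.mem_add]; tauto
        · tauto
      rw [hbig']
      have hcountp : (k :: t).count p = 0 := by
        rw [List.count_cons_of_ne hkp, List.count_eq_zero]
        exact hpt
      constructor
      · rintro ((hb | ⟨rfl, hr⟩) | ⟨rfl, hr⟩ | ⟨ht, hne, hc⟩)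
        · exact Or.inl hb
        · exact Or.inr (Or.inl ⟨rfl, by rw [hcountp]; push_cast; omega⟩)
        · refine Or.inr (Or.inr ⟨List.mem_cons_self, hkp, ?_⟩)
          rw [List.count_cons_self]; push_cast; omega
        · have hxp : x ≠ p := fun h => by
            subst h; exact hpt ht
          refine Or.inr (Or.inr ⟨List.mem_cons_of_mem _ ht, hxp, ?_⟩)
          by_cases hxk : x = k
          · subst hxk; rw [List.count_cons_self]; push_cast; omega
          · rwa [List.count_cons_of_ne (Ne.symm hxk)]
      · rintro (hb | ⟨rfl, hr⟩ | ⟨hm, hne, hc⟩)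
        · exact Or.inl (Or.inl hb)
        · rw [hcountp] at hr
          exact Or.inl (Or.inr ⟨rfl, by push_cast at hr; omega⟩)
        · rcases List.mem_cons.mp hm with rfl | ht
          · rw [List.count_cons_self] at hc
            refine Or.inr (Or.inl ⟨rfl, by push_cast at hc ⊢; omega⟩)
          · by_cases hxk : x = k
            · subst hxk
              rw [List.count_cons_self] at hc
              exact Or.inr (Or.inl ⟨rfl, by push_cast at hc ⊢; omega⟩)
            · rw [List.count_cons_of_ne (Ne.symm hxk)] at hc
              exact Or.inr (Or.inr ⟨ht, hxk, hc⟩)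

-- the collected set is exactly the keys whose multiplicity reaches min_city_poi
theorem big_spec (m : Int) (keys : List String) (x : String) :
    (x ∈ pvFlush m ((PySem.List.sorted keys (fun y => y) false).foldl (pvScanStep m)
        (PySem.Set.ofList [], none, 0))) ↔ x ∈ keys ∧ (keys.count x : Int) ≥ m := by
  have hperm : (PySem.List.sorted keys (fun y => y) false).Perm keys :=
    PySem.List.sorted_perm keys (fun y => y) false
  have hpw : (PySem.List.sorted keys (fun y => y) false).Pairwise (· ≤ ·) := by
    have h := PySem.List.sorted_pairwise keys (fun y => y)
    simpa using h
  rcases hs : PySem.List.sorted keys (fun y => y) false with _ | ⟨hd, tl⟩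
  · rw [hs] at hperm
    have hnil : keys = [] := hperm.symm.eq_nil
    subst hnil
    simp [pvFlush, PySem.Set.ofList]
  · rw [hs] at hperm hpw
    have hstep : pvScanStep m (PySem.Set.ofList [], none, 0) hd
        = (PySem.Set.ofList [], some hd, 1) := by simp [pvScanStep, PySem.Set.ofList]
    rw [List.foldl_cons, hstep,
      scan_invariant m tl (PySem.Set.ofList []) hd 1 hpw.of_cons
        (fun y hy => (List.pairwise_cons.mp hpw).1 y hy) x]
    have hcnt : ∀ z, keys.count z = (hd :: tl).count z := fun z => (hperm.count_eq z).symm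
    have hmem : ∀ z, z ∈ keys ↔ z ∈ hd :: tl := fun z => ⟨fun h => hperm.mem_iff.mpr h, fun h => hperm.mem_iff.mp h⟩
    constructor
    · rintro (hb | ⟨rfl, hr⟩ | ⟨ht, hne, hc⟩)
      · exact absurd hb (by simp [PySem.Set.ofList])
      · refine ⟨(hmem x).mpr List.mem_cons_self, ?_⟩
        rw [hcnt, List.count_cons_self]; push_cast at hr ⊢; omega
      · refine ⟨(hmem x).mpr (List.mem_cons_of_mem _ ht), ?_⟩
        rw [hcnt, List.count_cons_of_ne (Ne.symm hne)]; exact hc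
    · rintro ⟨hmx, hcx⟩
      rw [hcnt] at hcx
      rcases List.mem_cons.mp ((hmem x).mp hmx) with rfl | ht
      · rw [List.count_cons_self] at hcx
        exact Or.inr (Or.inl ⟨rfl, by push_cast at hcx ⊢; omega⟩)
      · by_cases hne : x = hd
        · subst hne
          rw [List.count_cons_self] at hcx
          exact Or.inr (Or.inl ⟨rfl, by push_cast at hcx ⊢; omega⟩)
        · rw [List.count_cons_of_ne (Ne.symm hne)] at hcx
          exact Or.inr (Or.inr ⟨ht, hne, hcx⟩)

-- the two geo_map folds produce the same dict
theorem geo_map_eq (bl : List (String × List (String × String))) (m : Int) :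
    (bl.foldl (fun g p =>
      let state := pvBGet p.2 "state"
      let city := pvBGet p.2 "city"
      let key := state ++ ":" ++ city
      let bucket := if (PySem.Dict.counter (bl.map (fun q => pvBGet q.2 "state" ++ ":" ++ pvBGet q.2 "city"))).getD key 0 ≥ m then key else state ++ ":_other"
      g.insert p.1 [("state", state), ("city", city), ("bucket", bucket)]) PySem.Dict.empty)
    = (((bl.map (fun p => (p.1, pvBGet p.2 "state", pvBGet p.2 "city"))).zip
          ((bl.map (fun p => (p.1, pvBGet p.2 "state", pvBGet p.2 "city"))).map (fun r => r.2.1 ++ ":" ++ r.2.2))).foldl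
        (fun g rk =>
          let bucket := if (pvFlush m ((PySem.List.sorted ((bl.map (fun p => (p.1, pvBGet p.2 "state", pvBGet p.2 "city"))).map (fun r => r.2.1 ++ ":" ++ r.2.2)) (fun y => y) false).foldl (pvScanStep m) (PySem.Set.ofList [], none, 0))).contains rk.2 then rk.2 else rk.1.2.1 ++ ":_other"
          g.insert rk.1.1 [("state", rk.1.2.1), ("city", rk.1.2.2), ("bucket", bucket)]) PySem.Dict.empty) := by
  simp only [List.map_map, Function.comp_def]
  rw [List.zip_map', List.foldl_map]
  apply PySem.List.foldl_congr_mem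
  intro acc p hp
  simp only
  have hkmem : (pvBGet p.2 "state" ++ ":" ++ pvBGet p.2 "city")
      ∈ bl.map (fun q => pvBGet q.2 "state" ++ ":" ++ pvBGet q.2 "city") :=
    List.mem_map_of_mem hp
  have hcond : ((PySem.Dict.counter (bl.map (fun q => pvBGet q.2 "state" ++ ":" ++ pvBGet q.2 "city"))).getD (pvBGet p.2 "state" ++ ":" ++ pvBGet p.2 "city") 0 ≥ m)
      ↔ ((pvFlush m ((PySem.List.sorted (bl.map (fun q => pvBGet q.2 "state" ++ ":" ++ pvBGet q.2 "city")) (fun y => y) false).foldl (pvScanStep m) (PySem.Set.ofList [], none, 0))).contains (pvBGet p.2 "state" ++ ":" ++ pvBGet p.2 "city") = true) := by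
    rw [PySem.Dict.getD_counter]
    rw [show ((pvFlush m ((PySem.List.sorted (bl.map (fun q => pvBGet q.2 "state" ++ ":" ++ pvBGet q.2 "city")) (fun y => y) false).foldl (pvScanStep m) (PySem.Set.ofList [], none, 0))).contains (pvBGet p.2 "state" ++ ":" ++ pvBGet p.2 "city") = true)
        ↔ (pvBGet p.2 "state" ++ ":" ++ pvBGet p.2 "city") ∈ pvFlush m ((PySem.List.sorted (bl.map (fun q => pvBGet q.2 "state" ++ ":" ++ pvBGet q.2 "city")) (fun y => y) false).foldl (pvScanStep m) (PySem.Set.ofList [], none, 0)) from by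
      simp [PySem.Set.contains]]
    rw [big_spec]
    constructor
    · intro h; exact ⟨hkmem, h⟩
    · rintro ⟨_, h⟩; exact h
  by_cases h : (pvFlush m ((PySem.List.sorted (bl.map (fun q => pvBGet q.2 "state" ++ ":" ++ pvBGet q.2 "city")) (fun y => y) false).foldl (pvScanStep m) (PySem.Set.ofList [], none, 0))).contains (pvBGet p.2 "state" ++ ":" ++ pvBGet p.2 "city") = true
  · rw [if_pos (hcond.mpr h), if_pos h]
  · rw [if_neg (fun hh => h (hcond.mp hh)), if_neg h]

-- A's skip-or-insert-at-len loop over a Nodup list appends enumerated fresh keys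
theorem vocab_loop_items (l : List String) (hl : l.Nodup) (d : PySem.Dict String Int)
    (hd : d.keys.Nodup) :
    (l.foldl (fun d s => if d.contains s then d else d.insert s (d.size : Int)) d).items
      = d.items ++ (PySem.List.enumerate (l.filter (fun s => !d.contains s)) (d.size : Int)).map
          (fun p => (p.2, p.1)) := by
  induction l generalizing d with
  | nil => simp
  | cons s t ih =>
    rw [List.foldl_cons]
    by_cases h : d.contains s = true
    · simp only [h, if_true, List.filter_cons, Bool.not_true, Bool.false_eq_true, if_false]
      exact ih (List.Nodup.of_cons hl) d hd
    · have h' : d.contains s = false := by simpa using h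
      simp only [h', if_false, Bool.false_eq_true, List.filter_cons, Bool.not_false, if_true]
      rw [ih (List.Nodup.of_cons hl) _ (PySem.Dict.nodup_keys_insert d s _ hd)]
      have hfilter : t.filter (fun x => !(d.insert s (d.size : Int)).contains x)
          = t.filter (fun x => !d.contains x) := by
        apply List.filter_congr
        intro x hx
        have hxs : x ≠ s := by
          rintro rfl; exact (List.nodup_cons.mp hl).1 hx
        rw [PySem.Dict.contains_insert]
        simp [hxs]
      rw [hfilter, PySem.Dict.items_insert_of_not_contains d _ h',
        PySem.Dict.size_insert, h', PySem.List.enumerate_cons]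
      simp [Int.add_comm]

theorem extras_nodup (values : List String) :
    ((PySem.List.sorted (PySem.Set.ofList values) (fun x => x) false).filter
      (fun v => !(v == "<PAD>" || v == "<UNK>"))).Nodup :=
  List.Nodup.filter _ ((PySem.List.sorted_perm (PySem.Set.ofList values) (fun x => x) false).symm.nodup (PySem.Set.nodup_ofList values))

-- B's fresh-key dict-literal merge, as items
theorem vocab_alt_items (values : List String) :
    (pvVocab values).items
      = [("<PAD>", (0 : Int)), ("<UNK>", 1)]
        ++ (PySem.List.enumerate
            ((PySem.List.sorted (PySem.Set.ofList values) (fun x => x) false).filter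
              (fun v => !(v == "<PAD>" || v == "<UNK>"))) 2).map (fun p => (p.2, p.1)) := by
  unfold pvVocab
  have h := PySem.Dict.items_foldl_insert_fresh
    (PySem.List.enumerate ((PySem.List.sorted (PySem.Set.ofList values) (fun x => x) false).filter
      (fun v => !(v == "<PAD>" || v == "<UNK>"))) 2)
    (fun p => p.2) (fun p => p.1) (PySem.Dict.mk [("<PAD>", 0), ("<UNK>", 1)])
    (by
      intro a ha
      have h2 : a.2 ∈ (PySem.List.sorted (PySem.Set.ofList values) (fun x => x) false).filter
          (fun v => !(v == "<PAD>" || v == "<UNK>")) := by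
        have hmap := List.mem_map_of_mem (f := fun p : Int × String => p.2) ha
        rwa [PySem.List.map_snd_enumerate] at hmap
      have hflt := List.of_mem_filter h2
      simp only [Bool.not_eq_eq_eq_not, Bool.not_true, Bool.or_eq_false_iff, beq_eq_false_iff_ne] at hflt
      simp [PySem.Dict.contains_mk, Ne.symm hflt.1, Ne.symm hflt.2])
    (by rw [PySem.List.map_snd_enumerate]; exact extras_nodup values)
  simpa using h

-- the two vocabulary builders coincide on any value list
theorem vocab_eq (values : List String) :
    ((PySem.List.sorted (PySem.Set.ofList values) (fun x => x) false).foldl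
        (fun d s => if d.contains s then d else d.insert s (d.size : Int))
        (PySem.Dict.mk [("<PAD>", 0), ("<UNK>", 1)])).items
      = (pvVocab values).items := by
  rw [vocab_loop_items _
    ((PySem.List.sorted_perm (PySem.Set.ofList values) (fun x => x) false).symm.nodup (PySem.Set.nodup_ofList values))
    _ (by simp [PySem.Dict.keys]),
    vocab_alt_items]
  have hfilter : (PySem.List.sorted (PySem.Set.ofList values) (fun x => x) false).filter
      (fun s => !(PySem.Dict.mk [("<PAD>", (0 : Int)), ("<UNK>", 1)]).contains s)
      = (PySem.List.sorted (PySem.Set.ofList values) (fun x => x) false).filter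
      (fun v => !(v == "<PAD>" || v == "<UNK>")) := by
    apply List.filter_congr
    intro x _
    simp [PySem.Dict.contains_mk, BEq.comm]
  rw [hfilter]
  rfl

-- ===== VERDICT (by name: the statement is the Claim_ definition above) =====
theorem build_geo_partition_spec : Claim_equal_build_geo_partition := by
  intro bl m _
  unfold Spec_build_geo_partition build_geo_partition build_geo_partition_alt
  simp only [pvGet_eq, counts_eq, geo_map_eq, vocab_eq]
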